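-- pv_equiv track=rewrite | github.com/qeeeew/vincents-home | tools/import_market_lab_round.py | merge_into_dataset
-- ===== SOURCE A (Python) =====
-- def merge_into_dataset(existing_records: list[dict], new_records: list[dict], round_key: str) -> list[dict]:
--     filtered = [record for record in existing_records if record.get("roundKey") != round_key]
--     combined = filtered + new_records
--     combined.sort(
--         key=lambda record: (
--             str(record.get("noticeDate") or ""),
--             record.get("district") or "",
--             record.get("housingName") or "",
--             record.get("housingType") or "",
--         ),
--         reverse=False,
--     )
--     combined.sort(key=lambda record: str(record.get("noticeDate") or ""), reverse=True)
--     return combined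
-- ===== SOURCE B (Python) =====
-- def merge_into_dataset(existing_records: list[dict], new_records: list[dict], round_key: str) -> list[dict]:
--     combined = [r for r in existing_records if r.get("roundKey") != round_key] + new_records
--     groups: dict[str, list] = {}
--     for record in combined:
--         groups.setdefault(str(record.get("noticeDate") or ""), []).append(record)
--     out = []
--     for date in sorted(groups, reverse=True):
--         out.extend(
--             sorted(
--                 groups[date],
--                 key=lambda record: (
--                     record.get("district") or "",
--                     record.get("housingName") or "",
--                     record.get("housingType") or "",
--                 ),
--             )
--         )
--     return out
-- ===== Notes on version B (the rewrite author's own statement) =====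
-- stated objective: alternative
-- what changed: A sorts the whole combined list twice (ascending by the 4-tuple, then stable descending by date); B makes one grouping pass into a date-keyed dict, sorts the distinct dates descending, and sorts each (typically small) group once by the secondary key.
import Mathlib
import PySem

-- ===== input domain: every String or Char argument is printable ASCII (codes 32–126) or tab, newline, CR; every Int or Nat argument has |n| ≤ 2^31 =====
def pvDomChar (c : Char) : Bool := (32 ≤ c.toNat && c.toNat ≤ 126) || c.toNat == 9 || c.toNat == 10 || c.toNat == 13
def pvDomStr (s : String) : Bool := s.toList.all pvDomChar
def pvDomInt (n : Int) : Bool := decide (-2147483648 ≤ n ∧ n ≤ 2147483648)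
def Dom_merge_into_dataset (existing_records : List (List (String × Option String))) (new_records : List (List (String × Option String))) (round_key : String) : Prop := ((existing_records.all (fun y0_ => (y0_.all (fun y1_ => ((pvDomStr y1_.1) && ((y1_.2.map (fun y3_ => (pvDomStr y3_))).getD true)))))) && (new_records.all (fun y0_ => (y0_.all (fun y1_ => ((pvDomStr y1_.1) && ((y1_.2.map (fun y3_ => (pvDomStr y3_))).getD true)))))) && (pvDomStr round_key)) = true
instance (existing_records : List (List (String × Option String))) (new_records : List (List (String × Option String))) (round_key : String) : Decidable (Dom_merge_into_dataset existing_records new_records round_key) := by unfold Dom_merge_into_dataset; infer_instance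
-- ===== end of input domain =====

-- B replaces A's two stable sort passes by one grouping pass into a date-keyed dict, then emits the
-- groups in descending date order, each group sorted once by the secondary key (objective: alternative).

-- Common field accessors shared by both ports (Python `record.get(k)` on the association list = first
-- match; `x or ""` on an Optional[str] collapses None and "" to "", and str() of a str is the identity).
def pvGetOpt (record : List (String × Option String)) (k : String) : Option String :=
  (record.find? (fun p => p.1 == k)).bind (fun p => p.2)

def pvField (record : List (String × Option String)) (k : String) : String :=
  (pvGetOpt record k).getD ""

def pvDateKey (record : List (String × Option String)) : String := pvField record "noticeDate"

-- the last three components of A's sort tuple, as a list (Python tuple comparison = lexicographic)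
def pvSecKey (record : List (String × Option String)) : List String :=
  [pvField record "district", pvField record "housingName", pvField record "housingType"]

-- ===== PORT A =====
-- Python's 4-string sort tuple is ported as a 4-element List String: equal-length list comparison in
-- Lean is exactly Python's tuple comparison (lexicographic, component by component).
def merge_into_dataset (existing_records : List (List (String × Option String))) (new_records : List (List (String × Option String))) (round_key : String) : List (List (String × Option String)) :=
  let filtered := existing_records.filter (fun record => pvGetOpt record "roundKey" != some round_key)
  let combined := filtered ++ new_records
  let pass1 := PySem.List.sorted combined (fun record => pvDateKey record :: pvSecKey record) false
  PySem.List.sorted pass1 (fun record => pvDateKey record) true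

-- ===== PORT B =====
-- the grouping loop of Source B: groups.setdefault(str(r.get("noticeDate") or ""), []).append(r)
def pvGroups (combined : List (List (String × Option String))) : PySem.Dict String (List (List (String × Option String))) :=
  combined.foldl (fun g record => g.modify (pvDateKey record) [] (fun grp => grp ++ [record])) PySem.Dict.empty

def merge_into_dataset_alt (existing_records : List (List (String × Option String))) (new_records : List (List (String × Option String))) (round_key : String) : List (List (String × Option String)) :=
  let combined := existing_records.filter (fun record => pvGetOpt record "roundKey" != some round_key) ++ new_records
  let groups := pvGroups combined
  (PySem.List.sorted groups.keys (fun d => d) true).foldl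
    (fun out d => out ++ PySem.List.sorted (groups.getD d []) pvSecKey false) []

-- ===== PRECONDITION & SPEC =====
def Spec_merge_into_dataset (existing_records : List (List (String × Option String))) (new_records : List (List (String × Option String))) (round_key : String) (out : List (List (String × Option String))) : Prop := out = merge_into_dataset_alt existing_records new_records round_key
instance (existing_records : List (List (String × Option String))) (new_records : List (List (String × Option String))) (round_key : String) (out : List (List (String × Option String))) : Decidable (Spec_merge_into_dataset existing_records new_records round_key out) := by unfold Spec_merge_into_dataset; infer_instance

-- ===== CLAIM (what is proved, stated in full; the proofs are below) =====
def Claim_equal_merge_into_dataset : Prop := ∀ (existing_records : List (List (String × Option String))) (new_records : List (List (String × Option String))) (round_key : String), Dom_merge_into_dataset existing_records new_records round_key → Spec_merge_into_dataset existing_records new_records round_key (merge_into_dataset existing_records new_records round_key)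

-- ===== LEMMAS AND PROOFS =====

-- insertBy: one-step unfolding
theorem pv_insertBy_cons {α : Type} (bef : α → α → Bool) (x y : α) (ys : List α) :
    PySem.List.insertBy bef x (y :: ys) =
      if bef x y then x :: y :: ys else y :: PySem.List.insertBy bef x ys := rfl

-- insertBy walks past a block it does not insert into
theorem pv_insertBy_skip {α : Type} (bef : α → α → Bool) (x : α) (l t : List α)
    (h : ∀ y ∈ l, bef x y = false) :
    PySem.List.insertBy bef x (l ++ t) = l ++ PySem.List.insertBy bef x t := by
  induction l with
  | nil => rfl
  | cons y ys ih =>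
    simp only [List.cons_append, pv_insertBy_cons, h y (by simp), Bool.false_eq_true, if_false]
    rw [ih (fun z hz => h z (by simp [hz]))]

-- insertBy puts x in front when it goes before everything
theorem pv_insertBy_front {α : Type} (bef : α → α → Bool) (x : α) (l : List α)
    (h : ∀ y ∈ l, bef x y = true) :
    PySem.List.insertBy bef x l = x :: l := by
  cases l with
  | nil => rfl
  | cons y ys => simp [pv_insertBy_cons, h y (by simp)]

-- insertBy only looks at comparisons of x with list members
theorem pv_insertBy_congr {α : Type} (bef bef' : α → α → Bool) (x : α) (l : List α)
    (h : ∀ y ∈ l, bef x y = bef' x y) :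
    PySem.List.insertBy bef x l = PySem.List.insertBy bef' x l := by
  induction l with
  | nil => rfl
  | cons y ys ih =>
    rw [pv_insertBy_cons, pv_insertBy_cons, h y (by simp), ih (fun z hz => h z (by simp [hz]))]

-- appending one element to the argument of an ascending sort inserts it
theorem pv_sorted_snoc {α κ : Type} [LT κ] [DecidableLT κ] (key : α → κ) (s : List α) (x : α) :
    PySem.List.sorted (s ++ [x]) key false =
      PySem.List.insertBy (fun a b => decide (key a < key b)) x (PySem.List.sorted s key false) := by
  rw [PySem.List.sorted_eq_foldl_insertBy, PySem.List.sorted_eq_foldl_insertBy, List.foldl_append]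
  rfl

-- the same for a descending sort
theorem pv_sorted_rev_snoc {α κ : Type} [LT κ] [DecidableLT κ] (key : α → κ) (s : List α) (x : α) :
    PySem.List.sorted (s ++ [x]) key true =
      PySem.List.insertBy (fun a b => decide (key b < key a)) x (PySem.List.sorted s key true) := by
  rw [PySem.List.sorted_rev_eq_foldl_insertBy, PySem.List.sorted_rev_eq_foldl_insertBy,
    List.foldl_append]
  rfl

-- inserting preserves the "no later element is key-smaller" invariant (needs only < transitive/irreflexive)
theorem pv_insertBy_pairwise {α κ : Type} [LT κ] [DecidableLT κ] (key : α → κ)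
    (htr : ∀ a b c : κ, a < b → b < c → a < c) (hirr : ∀ a : κ, ¬ a < a) (x : α) (l : List α)
    (hl : l.Pairwise (fun a b => ¬ key b < key a)) :
    (PySem.List.insertBy (fun a b => decide (key a < key b)) x l).Pairwise
      (fun a b => ¬ key b < key a) := by
  induction l with
  | nil => exact List.pairwise_singleton _ _
  | cons y ys ih =>
    rcases List.pairwise_cons.mp hl with ⟨hy, hys⟩
    rw [pv_insertBy_cons]
    split_ifs with hxy
    · have hxy' : key x < key y := of_decide_eq_true hxy
      refine List.pairwise_cons.mpr ⟨?_, hl⟩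
      intro z hz
      rcases List.mem_cons.mp hz with hz | hz
      · subst hz
        exact fun h => hirr _ (htr _ _ _ hxy' h)
      · intro h
        exact hy z hz (htr _ _ _ h hxy')
    · have hxy' : ¬ key x < key y := of_decide_eq_false (by simpa using hxy)
      refine List.pairwise_cons.mpr ⟨?_, ih hys⟩
      intro z hz
      rcases (PySem.List.mem_insertBy _ _ _ _).mp hz with hz | hz
      · exact hz ▸ hxy'
      · exact hy z hz

-- the ascending sort satisfies that invariant
theorem pv_sorted_pairwise_not_gt {α κ : Type} [LT κ] [DecidableLT κ] (key : α → κ)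
    (htr : ∀ a b c : κ, a < b → b < c → a < c) (hirr : ∀ a : κ, ¬ a < a) (xs : List α) :
    (PySem.List.sorted xs key false).Pairwise (fun a b => ¬ key b < key a) := by
  induction xs using List.reverseRecOn with
  | nil => simp [PySem.List.sorted_eq_foldl_insertBy]
  | append_singleton s x ih =>
    rw [pv_sorted_snoc]
    exact pv_insertBy_pairwise key htr hirr x _ ih

-- filtering out the inserted element removes it again
theorem pv_filter_insertBy_neg {α : Type} (p : α → Bool) (bef : α → α → Bool) (x : α)
    (l : List α) (hx : p x = false) :
    (PySem.List.insertBy bef x l).filter p = l.filter p := by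
  induction l with
  | nil => simp [PySem.List.insertBy, hx]
  | cons y ys ih =>
    rw [pv_insertBy_cons]
    split_ifs with hxy
    · simp [hx]
    · simp [List.filter_cons, ih]

-- filter commutes with inserting a kept element into an invariant-sorted list
theorem pv_filter_insertBy_pos {α κ : Type} [LT κ] [DecidableLT κ] (key : α → κ) (p : α → Bool)
    (hco : ∀ a b c : κ, a < b → ¬ c < b → a < c) (x : α) (l : List α)
    (hl : l.Pairwise (fun a b => ¬ key b < key a)) (hx : p x = true) :
    (PySem.List.insertBy (fun a b => decide (key a < key b)) x l).filter p =
      PySem.List.insertBy (fun a b => decide (key a < key b)) x (l.filter p) := by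
  induction l with
  | nil => simp [PySem.List.insertBy, hx]
  | cons y ys ih =>
    rcases List.pairwise_cons.mp hl with ⟨hy, hys⟩
    rw [pv_insertBy_cons]
    split_ifs with hxy
    · have hxy' : key x < key y := of_decide_eq_true hxy
      have hall : ∀ z ∈ (y :: ys).filter p, decide (key x < key z) = true := by
        intro z hz
        have hz0 := List.mem_of_mem_filter hz
        rcases List.mem_cons.mp hz0 with hz' | hz'
        · exact decide_eq_true (hz' ▸ hxy')
        · exact decide_eq_true (hco _ _ _ hxy' (hy z hz'))
      rw [pv_insertBy_front _ _ _ hall, List.filter_cons_of_pos hx]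
    · by_cases hpy : p y = true
      · rw [List.filter_cons_of_pos hpy, List.filter_cons_of_pos hpy, pv_insertBy_cons,
          if_neg hxy, ih hys]
      · have hpy' : p y = false := by simpa using hpy
        rw [List.filter_cons_of_neg (by simp [hpy']), List.filter_cons_of_neg (by simp [hpy']),
          ih hys]

-- filter commutes with the stable ascending sort
theorem pv_filter_sorted {α κ : Type} [LT κ] [DecidableLT κ] (key : α → κ) (p : α → Bool)
    (htr : ∀ a b c : κ, a < b → b < c → a < c) (hirr : ∀ a : κ, ¬ a < a)
    (hco : ∀ a b c : κ, a < b → ¬ c < b → a < c) (xs : List α) :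
    (PySem.List.sorted xs key false).filter p = PySem.List.sorted (xs.filter p) key false := by
  induction xs using List.reverseRecOn with
  | nil => simp [PySem.List.sorted_eq_foldl_insertBy]
  | append_singleton s x ih =>
    rw [pv_sorted_snoc, List.filter_append]
    by_cases hx : p x = true
    · rw [pv_filter_insertBy_pos key p hco x _ (pv_sorted_pairwise_not_gt key htr hirr s) hx, ih,
        List.filter_cons_of_pos hx, List.filter_nil, pv_sorted_snoc]
    · have hx' : p x = false := by simpa using hx
      rw [pv_filter_insertBy_neg p _ x _ hx', ih, List.filter_cons_of_neg (by simp [hx']),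
        List.filter_nil, List.append_nil]

-- two keys ordering the list elements the same way sort it identically
theorem pv_sorted_congr {α κ κ' : Type} [LT κ] [DecidableLT κ] [LT κ'] [DecidableLT κ']
    (key : α → κ) (key' : α → κ') (xs : List α)
    (h : ∀ a ∈ xs, ∀ b ∈ xs, (key a < key b ↔ key' a < key' b)) :
    PySem.List.sorted xs key false = PySem.List.sorted xs key' false := by
  induction xs using List.reverseRecOn with
  | nil => simp [PySem.List.sorted_eq_foldl_insertBy]
  | append_singleton s x ih =>
    rw [pv_sorted_snoc, pv_sorted_snoc,
      ih (fun a ha b hb => h a (by simp [ha]) b (by simp [hb]))]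
    refine pv_insertBy_congr _ _ x _ (fun y hy => ?_)
    have hys : y ∈ s := (PySem.List.mem_sorted s key' false y).mp hy
    exact decide_eq_decide.mpr (h x (by simp) y (by simp [hys]))

-- inserting into a descending grouped concatenation appends to the element's own group
theorem pv_insert_grouped {α κ : Type} [LinearOrder κ] (key : α → κ) (x : α) :
    ∀ (D : List κ) (gs : κ → List α), D.Pairwise (fun a b => b < a) → key x ∈ D →
    (∀ d ∈ D, ∀ r ∈ gs d, key r = d) →
    PySem.List.insertBy (fun a b => decide (key b < key a)) x (D.flatMap gs) =
      D.flatMap (fun d => gs d ++ if key x = d then [x] else []) := by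
  intro D
  induction D with
  | nil => intro gs _ hx _; cases hx
  | cons d0 D' ih =>
    intro gs hD hx hgs
    rcases List.pairwise_cons.mp hD with ⟨hd0, hD'⟩
    rw [List.flatMap_cons, List.flatMap_cons]
    by_cases hxd : key x = d0
    · have h1 : ∀ y ∈ gs d0, decide (key y < key x) = false := by
        intro y hy
        have : key y = d0 := hgs d0 (by simp) y hy
        simp [this, hxd]
      rw [pv_insertBy_skip _ _ _ _ h1]
      have h2 : ∀ z ∈ D'.flatMap gs, decide (key z < key x) = true := by
        intro z hz
        rcases List.mem_flatMap.mp hz with ⟨d, hd, hzd⟩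
        have : key z = d := hgs d (by simp [hd]) z hzd
        exact decide_eq_true (by rw [this, hxd]; exact hd0 d hd)
      rw [pv_insertBy_front _ _ _ h2, if_pos hxd]
      have h3 : D'.flatMap (fun d => gs d ++ if key x = d then [x] else []) = D'.flatMap gs := by
        apply List.flatMap_congr
        intro d hd
        have hne : key x ≠ d := by
          intro h
          have hlt := hd0 d hd
          rw [← h, hxd] at hlt
          exact lt_irrefl d0 hlt
        simp [hne]
      rw [h3]
      simp
    · have hx' : key x ∈ D' := by
        rcases List.mem_cons.mp hx with h | h
        · exact absurd h hxd
        · exact h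
      have h1 : ∀ y ∈ gs d0, decide (key y < key x) = false := by
        intro y hy
        have hyd : key y = d0 := hgs d0 (by simp) y hy
        have hlt : key x < d0 := hd0 _ hx'
        rw [hyd, decide_eq_false_iff_not]
        exact not_lt.mpr hlt.le
      rw [pv_insertBy_skip _ _ _ _ h1, if_neg hxd,
        ih gs hD' hx' (fun d hd r hr => hgs d (by simp [hd]) r hr)]
      simp

-- a descending stable sort is the concatenation, over any strictly descending key list covering all
-- keys, of the original-order groups
theorem pv_sorted_rev_grouped {α κ : Type} [LinearOrder κ] [BEq κ] [LawfulBEq κ] (key : α → κ)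
    (s : List α) :
    ∀ (D : List κ), D.Pairwise (fun a b => b < a) → (∀ r ∈ s, key r ∈ D) →
    PySem.List.sorted s key true = D.flatMap (fun d => s.filter (fun r => key r == d)) := by
  induction s using List.reverseRecOn with
  | nil =>
    intro D _ _
    simp [PySem.List.sorted_rev_eq_foldl_insertBy]
  | append_singleton s x ih =>
    intro D hD hmem
    rw [pv_sorted_rev_snoc, ih D hD (fun r hr => hmem r (by simp [hr]))]
    have hgs : ∀ d ∈ D, ∀ r ∈ s.filter (fun r => key r == d), key r = d := by
      intro d _ r hr
      exact eq_of_beq (List.mem_filter.mp hr).2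
    rw [pv_insert_grouped key x D _ hD (hmem x (by simp)) hgs]
    apply List.flatMap_congr
    intro d _
    rw [List.filter_append]
    congr 1
    by_cases h : key x = d <;> simp [h]

-- the grouping dict: one more record goes to (the end of) its date's group
theorem pv_groups_snoc (c : List (List (String × Option String)))
    (x : List (String × Option String)) :
    pvGroups (c ++ [x]) =
      (pvGroups c).insert (pvDateKey x) ((pvGroups c).getD (pvDateKey x) [] ++ [x]) := by
  simp [pvGroups, List.foldl_append, PySem.Dict.modify]

-- the group stored under d is exactly the date-d records in original order
theorem pv_groups_getD (c : List (List (String × Option String))) :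
    ∀ d, (pvGroups c).getD d [] = c.filter (fun r => pvDateKey r == d) := by
  induction c using List.reverseRecOn with
  | nil =>
    intro d
    simp [pvGroups, PySem.Dict.getD, PySem.Dict.get?_empty]
  | append_singleton c x ih =>
    intro d
    rw [pv_groups_snoc, List.filter_append]
    by_cases h : d = pvDateKey x
    · subst h
      rw [PySem.Dict.getD, PySem.Dict.get?_insert_self, Option.getD_some, ih]
      simp
    · rw [PySem.Dict.getD, PySem.Dict.get?_insert_of_ne _ _ h, ← PySem.Dict.getD, ih]
      have : ¬ (pvDateKey x == d) = true := by simpa using fun hx => h hx.symm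
      simp [this]

-- the dict's key list enumerates exactly the dates occurring in c
theorem pv_mem_keys_groups (c : List (List (String × Option String))) :
    ∀ k, k ∈ (pvGroups c).keys ↔ ∃ r ∈ c, pvDateKey r = k := by
  induction c using List.reverseRecOn with
  | nil => intro k; simp [pvGroups, PySem.Dict.empty, PySem.Dict.keys]
  | append_singleton c x ih =>
    intro k
    rw [pv_groups_snoc]
    by_cases hc : (pvGroups c).contains (pvDateKey x) = true
    · rw [PySem.Dict.keys_insert_of_contains _ _ hc, ih]
      constructor
      · rintro ⟨r, hr, hk⟩; exact ⟨r, by simp [hr], hk⟩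
      · rintro ⟨r, hr, hk⟩
        rcases List.mem_append.mp hr with hr | hr
        · exact ⟨r, hr, hk⟩
        · have hrx : r = x := by simpa using hr
          subst hrx
          have hmem := (PySem.Dict.contains_iff_mem_keys _ _).mp hc
          rcases (ih (pvDateKey r)).mp hmem with ⟨r', hr', hk'⟩
          exact ⟨r', hr', hk ▸ hk'⟩
    · have hc' : (pvGroups c).contains (pvDateKey x) = false := by simpa using hc
      rw [PySem.Dict.keys_insert_of_not_contains _ _ hc']
      rw [List.mem_append, ih]
      constructor
      · rintro (⟨r, hr, hk⟩ | hk)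
        · exact ⟨r, by simp [hr], hk⟩
        · have hkx : k = pvDateKey x := by simpa using hk
          exact ⟨x, by simp, hkx.symm⟩
      · rintro ⟨r, hr, hk⟩
        rcases List.mem_append.mp hr with hr | hr
        · exact Or.inl ⟨r, hr, hk⟩
        · have hrx : r = x := by simpa using hr
          subst hrx
          exact Or.inr (by simp [hk])

-- the dict's key list has no duplicates
theorem pv_nodup_keys_groups (c : List (List (String × Option String))) :
    (pvGroups c).keys.Nodup := by
  induction c using List.reverseRecOn with
  | nil => simp [pvGroups, PySem.Dict.empty, PySem.Dict.keys]
  | append_singleton c x ih =>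
    rw [pv_groups_snoc]
    by_cases hc : (pvGroups c).contains (pvDateKey x) = true
    · rw [PySem.Dict.keys_insert_of_contains _ _ hc]; exact ih
    · have hc' : (pvGroups c).contains (pvDateKey x) = false := by simpa using hc
      rw [PySem.Dict.keys_insert_of_not_contains _ _ hc']
      refine List.Nodup.append ih (by simp) ?_
      intro a ha hb
      have : a = pvDateKey x := by simpa using hb
      subst this
      exact absurd ((PySem.Dict.contains_iff_mem_keys _ _).mpr ha) (by simp [hc'])

-- order facts for the 4-component List String key (core list order = lexicographic)
theorem pv_ls_trans (a b c : List String) : a < b → b < c → a < c := fun h1 h2 =>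
  List.lt_trans h1 h2

theorem pv_ls_irrefl (a : List String) : ¬ a < a := lt_irrefl a

theorem pv_ls_co (a b c : List String) : a < b → ¬ c < b → a < c := fun h1 h2 =>
  lt_of_lt_of_le h1 (not_lt.mp h2)

-- on records sharing one date, A's 4-tuple key orders exactly like the 3-tuple secondary key
theorem pv_key4_iff_sec (d : String) (a b : List (String × Option String))
    (ha : pvDateKey a = d) (hb : pvDateKey b = d) :
    (pvDateKey a :: pvSecKey a < pvDateKey b :: pvSecKey b) ↔ pvSecKey a < pvSecKey b := by
  rw [ha, hb, List.cons_lt_cons_iff]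
  simp

-- the heart of the proof: the two pipelines agree on any combined list c
theorem pv_main (c : List (List (String × Option String))) :
    PySem.List.sorted (PySem.List.sorted c (fun record => pvDateKey record :: pvSecKey record) false)
        (fun record => pvDateKey record) true =
      (PySem.List.sorted (pvGroups c).keys (fun d => d) true).foldl
        (fun out d => out ++ PySem.List.sorted ((pvGroups c).getD d []) pvSecKey false) [] := by
  rw [PySem.List.foldl_append_eq_flatMap
    (fun d => PySem.List.sorted ((pvGroups c).getD d []) pvSecKey false)
    (PySem.List.sorted (pvGroups c).keys (fun d => d) true) []]
  rw [List.nil_append]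
  have hDnodup : (PySem.List.sorted (pvGroups c).keys (fun d => d) true).Nodup :=
    (PySem.List.sorted_perm (pvGroups c).keys (fun d => d) true).symm.nodup
      (pv_nodup_keys_groups c)
  have hDpair : (PySem.List.sorted (pvGroups c).keys (fun d => d) true).Pairwise
      (fun a b => b < a) := by
    have h1 := PySem.List.sorted_pairwise_rev (pvGroups c).keys (fun d => d)
    have h2 : (PySem.List.sorted (pvGroups c).keys (fun d => d) true).Pairwise
        (fun a b => a ≠ b) := hDnodup
    exact (h1.and h2).imp (fun h => lt_of_le_of_ne h.1 (Ne.symm h.2))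
  have hmem : ∀ r ∈ PySem.List.sorted c (fun record => pvDateKey record :: pvSecKey record) false,
      pvDateKey r ∈ PySem.List.sorted (pvGroups c).keys (fun d => d) true := by
    intro r hr
    have hrc : r ∈ c := (PySem.List.mem_sorted _ _ _ _).mp hr
    exact (PySem.List.mem_sorted _ _ _ _).mpr
      ((pv_mem_keys_groups c (pvDateKey r)).mpr ⟨r, hrc, rfl⟩)
  rw [pv_sorted_rev_grouped (fun record => pvDateKey record) _ _ hDpair hmem]
  apply List.flatMap_congr
  intro d _
  rw [pv_filter_sorted _ _ pv_ls_trans pv_ls_irrefl pv_ls_co c, pv_groups_getD c d]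
  exact pv_sorted_congr _ _ _ (fun a ha b hb =>
    pv_key4_iff_sec d a b (eq_of_beq (List.mem_filter.mp ha).2)
      (eq_of_beq (List.mem_filter.mp hb).2))
  
-- ===== VERDICT (by name: the statement is the Claim_ definition above) =====
theorem merge_into_dataset_spec : Claim_equal_merge_into_dataset := by
  intro existing_records new_records round_key _
  unfold Spec_merge_into_dataset
  simp only [merge_into_dataset, merge_into_dataset_alt]
  exact pv_main _
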